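-- pv_equiv track=rewrite | github.com/polygon283/yukicoder_level1 | No_1229.py | count_conbination
-- ===== SOURCE A (Python) =====
-- def count_conbination(N):
--     count = 0
--     max_T = N // 5
--
--     for T in range(max_T + 1):
--         for C in range(T + 1):
--             TC_sum = (5*T + 2*C)
--             if (N - TC_sum) % 3 == 0 and (N - TC_sum) >= 0:
--                 count += 1
--
--     return count
-- ===== SOURCE B (Python) =====
-- def count_conbination(N):
--     # For each T, count valid C in [0, min(T, (N-5T)//2)] in the residue class
--     # C ≡ 2*(N-5T) (mod 3) by a closed formula: O(N) instead of O(N^2).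
--     count = 0
--     for T in range(N // 5 + 1):
--         R = N - 5 * T
--         U = min(T, R // 2)
--         r = (2 * R) % 3
--         if U >= r:
--             count += (U - r) // 3 + 1
--     return count
-- ===== Notes on version B (the rewrite author's own statement) =====
-- stated objective: faster
-- what changed: Replaced A's inner loop over C by a closed-form count of the residue class C ≡ 2(N-5T) (mod 3) within [0, min(T,(N-5T)//2)], leaving one loop over T.
import Mathlib
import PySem

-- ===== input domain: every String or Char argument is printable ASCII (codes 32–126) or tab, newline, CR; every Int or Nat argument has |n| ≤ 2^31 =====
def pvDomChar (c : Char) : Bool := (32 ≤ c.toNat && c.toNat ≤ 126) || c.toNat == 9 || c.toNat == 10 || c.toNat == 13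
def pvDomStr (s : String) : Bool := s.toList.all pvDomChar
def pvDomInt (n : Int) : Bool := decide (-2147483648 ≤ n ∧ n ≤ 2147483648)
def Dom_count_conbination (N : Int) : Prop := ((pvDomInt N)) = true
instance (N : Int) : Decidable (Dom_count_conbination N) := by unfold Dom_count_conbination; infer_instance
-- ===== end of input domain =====

-- B replaces A's inner loop over C by a closed-form count of the residue class
-- C ≡ 2(N-5T) (mod 3) within [0, min(T, (N-5T)//2)]: O(N) instead of O(N^2).

-- ===== PORT A =====
def count_conbination (N : Int) : Int :=
  let max_T := PySem.Int.floordiv N 5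
  (PySem.List.pyRange 0 (max_T + 1) 1).foldl (fun count T =>
    (PySem.List.pyRange 0 (T + 1) 1).foldl (fun count C =>
      let TC_sum := 5 * T + 2 * C
      if PySem.Int.mod (N - TC_sum) 3 = 0 ∧ N - TC_sum ≥ 0 then count + 1 else count)
      count) 0

-- ===== PORT B =====
def count_conbination_alt (N : Int) : Int :=
  (PySem.List.pyRange 0 (PySem.Int.floordiv N 5 + 1) 1).foldl (fun count T =>
    let R := N - 5 * T
    let U := min T (PySem.Int.floordiv R 2)
    let r := PySem.Int.mod (2 * R) 3
    if U ≥ r then count + (PySem.Int.floordiv (U - r) 3 + 1) else count) 0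

-- ===== PRECONDITION & SPEC =====
def Spec_count_conbination (N : Int) (out : Int) : Prop := out = count_conbination_alt N
instance (N : Int) (out : Int) : Decidable (Spec_count_conbination N out) := by unfold Spec_count_conbination; infer_instance

-- ===== CLAIM (what is proved, stated in full; the proofs are below) =====
def Claim_equal_count_conbination : Prop := ∀ (N : Int), Dom_count_conbination N → Spec_count_conbination N (count_conbination N)

-- ===== LEMMAS AND PROOFS =====

-- Closed form for one step of A's inner loop range: the count over C ∈ [0, m]
-- of the condition gains exactly the indicator of C = m.
theorem cc_step (R m : Int) (hm : 0 ≤ m) :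
    (if min m (R/2) ≥ (2*R)%3 then (min m (R/2) - (2*R)%3)/3 + 1 else 0)
    = (if min (m-1) (R/2) ≥ (2*R)%3 then (min (m-1) (R/2) - (2*R)%3)/3 + 1 else 0)
    + (if (R-2*m)%3 = 0 ∧ R-2*m ≥ 0 then (1:Int) else 0) := by
  have h1 : 3 ∣ (R - 2*m) ↔ 3 ∣ (m - (2*R)%3) := by omega
  have h2 : 3 ∣ (R - 2*(R/2)) ↔ 3 ∣ (R/2 - (2*R)%3) := by omega
  rcases le_total m (R/2) with h | h
  · rw [min_eq_left h, min_eq_left (by omega : m-1 ≤ R/2)]; split_ifs <;> omega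
  · by_cases h2' : m - 1 ≤ R/2
    · rw [min_eq_right h, min_eq_left h2']; split_ifs <;> omega
    · rw [min_eq_right h, min_eq_right (by omega : R/2 ≤ m - 1)]; split_ifs <;> omega

-- A's inner loop over C ∈ range(b) equals the closed-form count.
theorem cc_inner (R : Int) : ∀ (n : Nat) (count : Int),
    (PySem.List.pyRange 0 (n : Int) 1).foldl
      (fun c C => if PySem.Int.mod (R - 2 * C) 3 = 0 ∧ R - 2 * C ≥ 0 then c + 1 else c) count
    = count + (if min ((n : Int) - 1) (R/2) ≥ (2*R)%3
               then (min ((n : Int) - 1) (R/2) - (2*R)%3)/3 + 1 else 0) := by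
  intro n
  induction n with
  | zero =>
    intro count
    rw [PySem.List.pyRange_one_eq_nil (by omega)]
    simp only [List.foldl_nil, Nat.cast_zero]
    have hnn := Int.emod_nonneg (2*R) (by omega : (3:Int) ≠ 0)
    have hmin := min_le_left ((0:Int) - 1) (R/2)
    split_ifs with h
    · omega
    · ring
  | succ n ih =>
    intro count
    have hcast : ((n + 1 : Nat) : Int) = (n : Int) + 1 := by push_cast; ring
    rw [hcast, PySem.List.pyRange_one_succ_right (by omega), List.foldl_append, ih]
    have hmod : PySem.Int.mod (R - 2 * (n : Int)) 3 = (R - 2 * (n : Int)) % 3 :=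
      PySem.Int.mod_eq_emod_of_pos (by omega)
    simp only [List.foldl, hmod]
    have := cc_step R (n : Int) (by omega)
    split_ifs at this ⊢ <;> omega

-- For T in A's outer range the two loop bodies agree.
theorem cc_body (N T count : Int) (hT : T ∈ PySem.List.pyRange 0 (PySem.Int.floordiv N 5 + 1) 1) :
    (PySem.List.pyRange 0 (T + 1) 1).foldl (fun count C =>
      let TC_sum := 5 * T + 2 * C
      if PySem.Int.mod (N - TC_sum) 3 = 0 ∧ N - TC_sum ≥ 0 then count + 1 else count) count
    = (let R := N - 5 * T
       let U := min T (PySem.Int.floordiv R 2)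
       let r := PySem.Int.mod (2 * R) 3
       if U ≥ r then count + (PySem.Int.floordiv (U - r) 3 + 1) else count) := by
  rw [PySem.List.mem_pyRange_one] at hT
  obtain ⟨hT0, hT1⟩ := hT
  have hfd : PySem.Int.floordiv N 5 = N / 5 := PySem.Int.floordiv_eq_ediv_of_pos (by omega)
  rw [hfd] at hT1
  set R := N - 5 * T with hRdef
  have hR : 0 ≤ R := by
    have := Int.mul_ediv_add_emod N 5
    have := Int.emod_nonneg N (by omega : (5:Int) ≠ 0)
    omega
  have hbody : ∀ (c C : Int),
      (let TC_sum := 5 * T + 2 * C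
       if PySem.Int.mod (N - TC_sum) 3 = 0 ∧ N - TC_sum ≥ 0 then c + 1 else c)
      = (if PySem.Int.mod (R - 2 * C) 3 = 0 ∧ R - 2 * C ≥ 0 then c + 1 else c) := by
    intro c C
    have : N - (5 * T + 2 * C) = R - 2 * C := by omega
    simp only [this]
  have hcastT : (T + 1 : Int) = (((T + 1).toNat : Nat) : Int) := by omega
  calc (PySem.List.pyRange 0 (T + 1) 1).foldl (fun count C =>
          let TC_sum := 5 * T + 2 * C
          if PySem.Int.mod (N - TC_sum) 3 = 0 ∧ N - TC_sum ≥ 0 then count + 1 else count) count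
      = (PySem.List.pyRange 0 (((T + 1).toNat : Nat) : Int) 1).foldl
          (fun c C => if PySem.Int.mod (R - 2 * C) 3 = 0 ∧ R - 2 * C ≥ 0 then c + 1 else c) count := by
        rw [← hcastT]
        exact PySem.List.foldl_congr_mem _ _ _ _ (fun c C _ => hbody c C)
    _ = count + (if min ((((T + 1).toNat : Nat) : Int) - 1) (R/2) ≥ (2*R)%3
               then (min ((((T + 1).toNat : Nat) : Int) - 1) (R/2) - (2*R)%3)/3 + 1 else 0) :=
        cc_inner R _ count
    _ = _ := by
        rw [← hcastT]
        have e1 : T + 1 - 1 = T := by ring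
        have e2 : PySem.Int.floordiv R 2 = R / 2 := PySem.Int.floordiv_eq_ediv_of_pos (by omega)
        have e3 : PySem.Int.mod (2 * R) 3 = (2 * R) % 3 := PySem.Int.mod_eq_emod_of_pos (by omega)
        have e4 : ∀ x, PySem.Int.floordiv x 3 = x / 3 :=
          fun x => PySem.Int.floordiv_eq_ediv_of_pos (by omega)
        simp only [e1, e2, e3, e4]
        split_ifs <;> omega

-- ===== VERDICT (by name: the statement is the Claim_ definition above) =====
theorem count_conbination_spec : Claim_equal_count_conbination := by
  intro N _
  unfold Spec_count_conbination count_conbination count_conbination_alt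
  exact PySem.List.foldl_congr_mem _ _ _ _ (fun c T hT => cc_body N T c hT)
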